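-- pv_equiv track=rewrite | github.com/qxl0/Leetcode-p2 | 3989-sum-of-beautiful-subsequences/3989-sum-of-beautiful-subsequences.py | totalBeauty
-- ===== SOURCE A (Python) =====
-- from typing import List
--
-- class BIT:
--     def __init__(self, n):
--         self.n = n
--         self.data = [0] * (n + 1)
--
--     def add(self, i, x):
--         while i <= self.n:
--             self.data[i] += x
--             i += i & -i
--
--     def sum(self, i):
--         res = 0
--         while i > 0:
--             res += self.data[i]
--             i -= i & -i
--         return res
--
-- def totalBeauty(nums: List[int]) -> int:
--     MOD=10**9+7
--     mx = max(nums)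
--     g_idx = [[] for _ in range(mx+1)]
--     for i in range(len(nums)):
--         j = 1
--         while j*j<=nums[i]:
--             if nums[i]%j==0:
--                 g_idx[j].append(i)
--                 if j*j != nums[i]:
--                     g_idx[nums[i]//j].append(i)
--             j += 1
--     seq = [0]*(mx+1)
--     for g in range(1, mx+1):
--
--         unique_vals = sorted(set(nums[idx] for idx in g_idx[g]))
--         val_to_rank = {val: i+1 for i,val in enumerate(unique_vals)}
--         arr = []
--         for idx in g_idx[g]:
--             arr.append(val_to_rank[nums[idx]])
--         bit = BIT(len(arr))
--         for x in arr:
--             tmp = (bit.sum(x-1) + 1)%MOD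
--             bit.add(x, tmp)
--             seq[g] = (seq[g]+tmp)%MOD
--     # seq, -->
--     dp = [0]*(mx+1)
--     for g in range(mx, 0, -1):
--         j = g*2
--         dp[g] = seq[g]
--         while j<=mx:
--             dp[g] = (dp[g] - dp[j] + MOD) %MOD
--             j += g
--     ret = 0
--     for g in range(1, mx+1):
--         ret += g*dp[g]
--         ret %= MOD
--     return ret
-- ===== SOURCE B (Python) =====
-- def totalBeauty(nums):
--     MOD = 10**9 + 7
--     mx = max(nums)
--     groups = [[] for _ in range(mx + 1)]
--     for v in nums:
--         j = 1
--         while j * j <= v: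
--             if v % j == 0:
--                 groups[j].append(v)
--                 if j * j != v:
--                     groups[v // j].append(v)
--             j += 1
--     seq = [0] * (mx + 1)
--     for g in range(1, mx + 1):
--         prev = []            # (value, weighted count of increasing subsequences ending here)
--         total = 0
--         for v in groups[g]:
--             cur = 1
--             for w, d in prev:
--                 if w < v:
--                     cur += d
--             cur %= MOD
--             prev.append((v, cur))
--             total = (total + cur) % MOD
--         seq[g] = total
--     f = [0] * (mx + 1)
--     ret = 0
--     for g in range(mx, 0, -1):
--         val = seq[g]
--         j = 2 * g
--         while j <= mx:
--             val = (val - f[j]) % MOD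
--             j += g
--         f[g] = val
--         ret = (ret + g * val) % MOD
--     return ret
-- ===== Notes on version B (the rewrite author's own statement) =====
-- stated objective: simpler
-- what changed: The per-divisor-group Fenwick tree (BIT) with coordinate compression (sorted set + rank dict) is replaced by a direct quadratic DP over the group's values paired with their weights, and the Moebius-subtraction loop and the final weighted-sum loop are merged into one backward pass.
import Mathlib
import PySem

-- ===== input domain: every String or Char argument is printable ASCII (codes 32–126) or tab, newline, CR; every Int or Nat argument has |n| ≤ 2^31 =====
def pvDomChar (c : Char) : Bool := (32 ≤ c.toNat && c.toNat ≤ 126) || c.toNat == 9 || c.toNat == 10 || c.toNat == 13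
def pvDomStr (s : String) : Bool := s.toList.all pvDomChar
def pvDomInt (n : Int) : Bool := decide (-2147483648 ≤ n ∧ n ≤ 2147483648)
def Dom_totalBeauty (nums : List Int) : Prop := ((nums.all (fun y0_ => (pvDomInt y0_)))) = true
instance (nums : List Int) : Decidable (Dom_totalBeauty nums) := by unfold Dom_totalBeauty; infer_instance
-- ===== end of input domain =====

-- B replaces A's per-group Fenwick tree + rank compression by a direct quadratic DP over
-- (value, weight) pairs and merges the final two loops into one backward pass (objective: simpler).

-- ===== PORT A =====

-- `i & -i` for `0 < i` equals `a - (a &&& (a-1))` on naturals; needed by the ports' termination.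
theorem pv_band_neg_self (i : Int) (h : 0 < i) :
    PySem.Int.band i (-i) = ((i.toNat - (i.toNat &&& (i.toNat - 1)) : Nat) : Int) := by
  have h1 : (0:Int) ≤ i := le_of_lt h
  have h2 : ¬ (0:Int) ≤ -i := by omega
  simp only [PySem.Int.band, if_pos h1, if_neg h2]
  have : (-(-i) - 1).toNat = i.toNat - 1 := by omega
  rw [this]

theorem pv_band_bounds (i : Int) (h : 0 < i) :
    1 ≤ PySem.Int.band i (-i) ∧ PySem.Int.band i (-i) ≤ i := by
  rw [pv_band_neg_self i h]
  have h1 : i.toNat &&& (i.toNat - 1) ≤ i.toNat - 1 := Nat.and_le_right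
  omega

-- g_idx[j].append(x)  (index j is in range at every call site)
def aAppend (g : List (List Int)) (j : Int) (x : Int) : List (List Int) :=
  PySem.List.pySetD g j (PySem.List.pyGetD g j [] ++ [x])

-- the inner `while j*j <= nums[i]` divisor loop of A
def aDivisors (v : Int) (i : Int) (g : List (List Int)) (j : Int) : List (List Int) :=
  if h : j * j ≤ v then
    let g1 :=
      if PySem.Int.mod v j = 0 then
        let g2 := aAppend g j i
        if j * j ≠ v then aAppend g2 (PySem.Int.floordiv v j) i else g2
      else g
    aDivisors v i g1 (j + 1)
  else g
termination_by (v + 1 - j).toNat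
decreasing_by
  have hv : 0 ≤ v := le_trans (mul_self_nonneg j) h
  have hj : j ≤ v := by
    rcases le_or_gt j 0 with hj0 | hj0
    · omega
    · nlinarith
  omega

-- BIT.add  (`0 < i` is a totality guard: every Python call has i ≥ 1 and i only grows)
def aBitAdd (data : List Int) (n : Int) (i : Int) (x : Int) : List Int :=
  if h : i ≤ n ∧ 0 < i then
    aBitAdd (PySem.List.pySetD data i (PySem.List.pyGetD data i 0 + x)) n
      (i + PySem.Int.band i (-i)) x
  else data
termination_by (n + 1 - i).toNat
decreasing_by
  have := pv_band_bounds i h.2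
  omega

-- BIT.sum  (accumulator form of `res = 0; while i > 0: ...`)
def aBitSum (data : List Int) (i : Int) (res : Int) : Int :=
  if h : 0 < i then
    aBitSum data (i - PySem.Int.band i (-i)) (res + PySem.List.pyGetD data i 0)
  else res
termination_by i.toNat
decreasing_by
  have := pv_band_bounds i h
  omega

-- the inner `while j <= mx` Moebius-subtraction loop of A  (`0 < g` is a totality guard: g ranges over mx..1)
def aMoebius (dp : List Int) (mx : Int) (g : Int) (j : Int) : List Int :=
  if h : j ≤ mx ∧ 0 < g then
    aMoebius
      (PySem.List.pySetD dp g
        (PySem.Int.mod (PySem.List.pyGetD dp g 0 - PySem.List.pyGetD dp j 0 + 1000000007) 1000000007))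
      mx g (j + g)
  else dp
termination_by (mx + 1 - j).toNat
decreasing_by omega

-- g_idx = [[] for _ in range(mx+1)]; for i in range(len(nums)): divisor loop (nums[i] is in range)
def aPhase1 (nums : List Int) (mx : Int) : List (List Int) :=
  (PySem.List.pyRange 0 (PySem.List.len nums) 1).foldl
    (fun g i => aDivisors (PySem.List.pyGetD nums i 0) i g 1)
    (List.replicate (mx + 1).toNat [])

-- one iteration of `for g in range(1, mx+1)`: rank-compress the group's values, run them
-- through a fresh BIT, accumulating into seq[g]
def aGroup (nums : List Int) (gIdx : List (List Int)) (seq : List Int) (g : Int) : List Int :=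
  let vals := (PySem.List.pyGetD gIdx g []).map (fun idx => PySem.List.pyGetD nums idx 0)
  let uniq := PySem.List.sorted (PySem.Set.ofList vals) (fun v => v)
  let ranks := uniq.zipIdx.foldl
    (fun (d : PySem.Dict Int Int) p => d.insert p.1 ((p.2 : Int) + 1)) PySem.Dict.empty
  let arr := vals.map (fun v => ranks.getD v 0)   -- val_to_rank[...]: the key is always present
  (arr.foldl (fun (st : List Int × List Int) x =>
      let tmp := PySem.Int.mod (aBitSum st.1 (x - 1) 0 + 1) 1000000007
      (aBitAdd st.1 (PySem.List.len arr) x tmp,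
       PySem.List.pySetD st.2 g (PySem.Int.mod (PySem.List.pyGetD st.2 g 0 + tmp) 1000000007)))
    (List.replicate (arr.length + 1) 0, seq)).2

def aPhase2 (nums : List Int) (gIdx : List (List Int)) (mx : Int) : List Int :=
  (PySem.List.pyRange 1 (mx + 1) 1).foldl (aGroup nums gIdx) (List.replicate (mx + 1).toNat 0)

-- dp[] with the Moebius subtraction over multiples, g = mx..1
def aPhase3 (seq : List Int) (mx : Int) : List Int :=
  (PySem.List.pyRange mx 0 (-1)).foldl (fun dp g =>
    aMoebius (PySem.List.pySetD dp g (PySem.List.pyGetD seq g 0)) mx g (g * 2))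
    (List.replicate (mx + 1).toNat 0)

-- ret = 0; for g in range(1, mx+1): ret += g*dp[g]; ret %= MOD
def aPhase4 (dp : List Int) (mx : Int) : Int :=
  (PySem.List.pyRange 1 (mx + 1) 1).foldl (fun ret g =>
    PySem.Int.mod (ret + g * PySem.List.pyGetD dp g 0) 1000000007) 0

def totalBeauty (nums : List Int) : Int :=
  match PySem.List.max? nums (fun v => v) with
  | none => 0   -- Python's max(nums) raises ValueError here; excluded by Pre_
  | some mx => aPhase4 (aPhase3 (aPhase2 nums (aPhase1 nums mx) mx) mx) mx

-- ===== PORT B =====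

-- groups[j].append(x)
def bAppend (g : List (List Int)) (j : Int) (x : Int) : List (List Int) :=
  PySem.List.pySetD g j (PySem.List.pyGetD g j [] ++ [x])

-- the inner `while j*j <= v` divisor loop of B (stores the value v, not the index)
def bDivisors (v : Int) (g : List (List Int)) (j : Int) : List (List Int) :=
  if h : j * j ≤ v then
    let g1 :=
      if PySem.Int.mod v j = 0 then
        let g2 := bAppend g j v
        if j * j ≠ v then bAppend g2 (PySem.Int.floordiv v j) v else g2
      else g
    bDivisors v g1 (j + 1)
  else g
termination_by (v + 1 - j).toNat
decreasing_by
  have hv : 0 ≤ v := le_trans (mul_self_nonneg j) h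
  have hj : j ≤ v := by
    rcases le_or_gt j 0 with hj0 | hj0
    · omega
    · nlinarith
  omega

-- the inner `while j <= mx` loop of B: val = (val - f[j]) % MOD  (`0 < g` is a totality guard)
def bMoebius (val : Int) (f : List Int) (mx : Int) (g : Int) (j : Int) : Int :=
  if h : j ≤ mx ∧ 0 < g then
    bMoebius (PySem.Int.mod (val - PySem.List.pyGetD f j 0) 1000000007) f mx g (j + g)
  else val
termination_by (mx + 1 - j).toNat
decreasing_by omega

-- groups = [[] for _ in range(mx+1)]; for v in nums: divisor loop storing values
def bPhase1 (nums : List Int) (mx : Int) : List (List Int) :=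
  nums.foldl (fun g v => bDivisors v g 1) (List.replicate (mx + 1).toNat ([] : List Int))

-- one iteration of `for g in range(1, mx+1)`: quadratic DP over (value, weight) pairs
def bGroup (groups : List (List Int)) (seq : List Int) (g : Int) : List Int :=
  let st := (PySem.List.pyGetD groups g []).foldl
    (fun (st : List (Int × Int) × Int) v =>
      let cur := PySem.Int.mod (st.1.foldl (fun c p => if p.1 < v then c + p.2 else c) 1) 1000000007
      (st.1 ++ [(v, cur)], PySem.Int.mod (st.2 + cur) 1000000007))
    ([], 0)
  PySem.List.pySetD seq g st.2

def bPhase2 (groups : List (List Int)) (mx : Int) : List Int :=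
  (PySem.List.pyRange 1 (mx + 1) 1).foldl (bGroup groups) (List.replicate (mx + 1).toNat 0)

-- f = [0]*(mx+1); ret = 0; single backward pass computing f[g] and accumulating ret
def bPhase3 (seq : List Int) (mx : Int) : List Int × Int :=
  (PySem.List.pyRange mx 0 (-1)).foldl
    (fun (st : List Int × Int) g =>
      let val := bMoebius (PySem.List.pyGetD seq g 0) st.1 mx g (2 * g)
      (PySem.List.pySetD st.1 g val, PySem.Int.mod (st.2 + g * val) 1000000007))
    (List.replicate (mx + 1).toNat 0, 0)

def totalBeauty_alt (nums : List Int) : Int :=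
  match PySem.List.max? nums (fun v => v) with
  | none => 0   -- max(nums) raises here in Python; excluded by Pre_
  | some mx => (bPhase3 (bPhase2 (bPhase1 nums mx) mx) mx).2

-- ===== PRECONDITION & SPEC =====

-- Pre_ excludes only the empty list, on which Python's max() raises ValueError.
def Pre_totalBeauty (nums : List Int) : Prop := nums ≠ []
instance (nums : List Int) : Decidable (Pre_totalBeauty nums) := by
  unfold Pre_totalBeauty; infer_instance

def pvWitness_totalBeauty : List Int := [2, 3, 6]

def Spec_totalBeauty (nums : List Int) (out : Int) : Prop := out = totalBeauty_alt nums
instance (nums : List Int) (out : Int) : Decidable (Spec_totalBeauty nums out) := by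
  unfold Spec_totalBeauty; infer_instance

-- ===== CLAIM (what is proved, stated in full; the proofs are below) =====
def Claim_equal_totalBeauty : Prop :=
  ∀ (nums : List Int), Dom_totalBeauty nums → Pre_totalBeauty nums →
    Spec_totalBeauty nums (totalBeauty nums)

-- ===== LEMMAS AND PROOFS =====

theorem pv_testBit_land_helper (x y u v : Nat) (hx : x / 2 = u) (hy : y / 2 = v) (i : Nat) :
    (x &&& y).testBit (i+1) = (u &&& v).testBit i := by
  rw [Nat.testBit_land, Nat.testBit_succ, Nat.testBit_succ, hx, hy, Nat.testBit_land]

theorem pv_land_even_odd (a b : Nat) : (2*a) &&& (2*b+1) = 2*(a &&& b) := by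
  apply Nat.eq_of_testBit_eq
  intro i
  cases i with
  | zero =>
      rw [Nat.testBit_land]
      simp [Nat.testBit_zero, Nat.mul_mod_right]
  | succ i =>
      rw [pv_testBit_land_helper _ _ a b (by omega) (by omega)]
      rw [Nat.testBit_succ, Nat.mul_div_cancel_left _ (by norm_num : 0 < 2)]

theorem pv_land_odd_even (a b : Nat) : (2*a+1) &&& (2*b) = 2*(a &&& b) := by
  apply Nat.eq_of_testBit_eq
  intro i
  cases i with
  | zero =>
      rw [Nat.testBit_land]
      simp [Nat.testBit_zero, Nat.mul_mod_right]
  | succ i =>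
      rw [pv_testBit_land_helper _ _ a b (by omega) (by omega)]
      rw [Nat.testBit_succ, Nat.mul_div_cancel_left _ (by norm_num : 0 < 2)]

def pvLsb (a : Nat) : Nat := a - (a &&& (a - 1))

theorem pvLsb_odd (m : Nat) : pvLsb (2*m+1) = 1 := by
  unfold pvLsb
  have h : 2*m+1-1 = 2*m := by omega
  rw [h, pv_land_odd_even, Nat.and_self]
  omega

theorem pvLsb_even (a : Nat) (h : 0 < a) : pvLsb (2*a) = 2 * pvLsb a := by
  unfold pvLsb
  have h1 : 2*a-1 = 2*(a-1)+1 := by omega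
  rw [h1, pv_land_even_odd]
  have h2 : a &&& (a-1) ≤ a - 1 := Nat.and_le_right
  omega

theorem pvLsb_pow (e m : Nat) : pvLsb (2^e * (2*m+1)) = 2^e := by
  induction e with
  | zero => simpa using pvLsb_odd m
  | succ e ih =>
      have h : 2^(e+1) * (2*m+1) = 2 * (2^e * (2*m+1)) := by ring
      rw [h, pvLsb_even _ (by positivity), ih]
      ring

theorem pv_decomp (a : Nat) (h : 0 < a) : ∃ e m, a = 2^e * (2*m+1) := by
  obtain ⟨k, m, hm, hmk⟩ := Nat.exists_eq_two_pow_mul_odd (show a ≠ 0 by omega)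
  obtain ⟨c, hc⟩ := hm
  exact ⟨k, c, by rw [hmk, hc]⟩

theorem pvLsb_pos (a : Nat) (h : 0 < a) : 0 < pvLsb a := by
  obtain ⟨e, m, rfl⟩ := pv_decomp a h
  rw [pvLsb_pow]; positivity

theorem pvLsb_le (a : Nat) : pvLsb a ≤ a := by unfold pvLsb; omega

theorem pvLsb_add_lt (a r : Nat) (ha : 0 < a) (hr : 0 < r) (h : r < pvLsb a) :
    pvLsb (a + r) = pvLsb r := by
  obtain ⟨e, m, rfl⟩ := pv_decomp a ha
  obtain ⟨f, k, rfl⟩ := pv_decomp r hr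
  rw [pvLsb_pow] at h ⊢
  have hf : 2^f ≤ 2^f * (2*k+1) := Nat.le_mul_of_pos_right _ (by omega)
  have hfe : f < e := by
    by_contra hc
    have : 2^e ≤ 2^f := Nat.pow_le_pow_right (by norm_num) (by omega)
    omega
  obtain ⟨j, rfl⟩ : ∃ j, e = f + 1 + j := ⟨e - f - 1, by omega⟩
  have hkey : 2^(f+1+j) * (2*m+1) + 2^f * (2*k+1)
      = 2^f * (2 * (2^j * (2*m+1) + k) + 1) := by
    rw [pow_add, pow_succ]
    ring
  rw [hkey, pvLsb_pow]

theorem pvLsb_add_self (a : Nat) (ha : 0 < a) : 2 * pvLsb a ≤ pvLsb (a + pvLsb a) := by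
  obtain ⟨e, m, rfl⟩ := pv_decomp a ha
  rw [pvLsb_pow]
  have h1 : 2^e * (2*m+1) + 2^e = 2^(e+1) * (m+1) := by ring
  obtain ⟨d, k, hdk⟩ := pv_decomp (m+1) (by omega)
  have h2 : 2^e * (2*m+1) + 2^e = 2^(e+1+d) * (2*k+1) := by
    rw [h1, hdk]; ring
  rw [h2, pvLsb_pow, pow_add, pow_succ]
  have h3 : 1 ≤ 2^d := Nat.one_le_two_pow
  nlinarith [Nat.one_le_two_pow (n := e)]

theorem pv_band_eq_lsb (i : Int) (h : 0 < i) :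
    PySem.Int.band i (-i) = ((pvLsb i.toNat : Nat) : Int) := by
  rw [pv_band_neg_self i h]; rfl

def pvQ (p j : Nat) : Bool := decide (1 ≤ p ∧ p ≤ j ∧ j - pvLsb j < p)

theorem pv_bitSum_eq (data : List Int) (c : Nat → Int) (n : Nat)
    (hinv : ∀ j : Nat, 1 ≤ j → j ≤ n →
      PySem.List.pyGetD data (j : Int) 0 = ∑ p ∈ Finset.Ioc (j - pvLsb j) j, c p) :
    ∀ a : Nat, a ≤ n → ∀ res : Int,
      aBitSum data (a : Int) res = res + ∑ p ∈ Finset.Ioc 0 a, c p := by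
  intro a
  induction a using Nat.strong_induction_on with
  | _ a ih =>
    intro ha res
    rw [aBitSum]
    by_cases h0 : (0:Int) < (a : Int)
    · rw [dif_pos h0]
      have ha0 : 0 < a := by exact_mod_cast h0
      rw [pv_band_eq_lsb _ h0]
      have ht : ((a : Int)).toNat = a := Int.toNat_natCast a
      rw [ht]
      have hle : pvLsb a ≤ a := pvLsb_le a
      have hcast : (a : Int) - ((pvLsb a : Nat) : Int) = ((a - pvLsb a : Nat) : Int) := by
        omega
      rw [hcast, ih (a - pvLsb a) (by have := pvLsb_pos a ha0; omega) (by omega)]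
      rw [hinv a ha0 ha]
      have hs := Finset.sum_Ioc_consecutive c (show 0 ≤ a - pvLsb a by omega)
        (show a - pvLsb a ≤ a by omega)
      rw [add_assoc, add_comm (∑ p ∈ Finset.Ioc (a - pvLsb a) a, c p), hs]
    · rw [dif_neg h0]
      have : a = 0 := by omega
      subst this
      simp

theorem pv_bitAdd_eq (n : Nat) (x : Int) (p : Nat) :
    ∀ K : Nat, ∀ i : Nat, n + 1 - i = K → pvQ p i = true →
      ∀ data : List Int, data.length = n + 1 →
        (aBitAdd data (n : Int) (i : Int) x).length = n + 1 ∧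
        ∀ j : Nat, 1 ≤ j → j ≤ n →
          PySem.List.pyGetD (aBitAdd data (n : Int) (i : Int) x) (j : Int) 0
            = PySem.List.pyGetD data (j : Int) 0
              + (if pvQ p j && decide (i ≤ j) then x else 0) := by
  intro K
  induction K using Nat.strong_induction_on with
  | _ K ih =>
    intro i hK hQ data hlen
    simp only [pvQ, decide_eq_true_eq] at hQ
    obtain ⟨hp1, hpi, hilsb⟩ := hQ
    have hi0 : 0 < i := by omega
    rw [aBitAdd]
    by_cases hin : (i : Int) ≤ (n : Int)
    · rw [dif_pos ⟨hin, by exact_mod_cast hi0⟩]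
      have hinN : i ≤ n := by exact_mod_cast hin
      have hlsb_pos := pvLsb_pos i hi0
      have hlsb_le := pvLsb_le i
      have hself := pvLsb_add_self i hi0
      -- the next loop index
      have hband : (i : Int) + PySem.Int.band (i : Int) (-(i : Int)) = ((i + pvLsb i : Nat) : Int) := by
        rw [pv_band_eq_lsb _ (by exact_mod_cast hi0)]
        push_cast [Int.toNat_natCast]
        ring
      set i' := i + pvLsb i with hi'
      have hQ' : pvQ p i' = true := by
        simp only [pvQ, decide_eq_true_eq]
        refine ⟨hp1, by omega, ?_⟩
        have h2 : 2 * pvLsb i ≤ pvLsb i' := hself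
        have hle' := pvLsb_le i'
        omega
      set data' := PySem.List.pySetD data (i : Int) (PySem.List.pyGetD data (i : Int) 0 + x) with hd'
      have hlen' : data'.length = n + 1 := by
        rw [hd', PySem.List.length_pySetD, hlen]
      have hrec := ih (n + 1 - i') (by omega) i' rfl hQ' data' hlen'
      rw [hband]
      refine ⟨hrec.1, ?_⟩
      intro j hj1 hjn
      rw [hrec.2 j hj1 hjn]
      have hgd : ∀ m : Nat, m ≤ n →
          PySem.List.pyGetD data' (m : Int) 0
            = if m = i then PySem.List.pyGetD data (i : Int) 0 + x
              else PySem.List.pyGetD data (m : Int) 0 := by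
        intro m hm
        rw [hd', PySem.List.pyGetD_pySetD_natCast data i m _ 0 (by omega)]
      rcases eq_or_ne j i with rfl | hne
      · -- j = i : updated now, untouched later
        rw [hgd j hjn, if_pos rfl]
        have hile : decide (j ≤ j) = true := by simp
        have hi'f : decide (i' ≤ j) = false := by simp; omega
        have hQj : pvQ p j = true := by simp [pvQ]; omega
        rw [hi'f, hQj, hile]
        simp
      · rw [hgd j hjn, if_neg hne]
        rcases Nat.lt_or_ge j i with hlt | hge
        · -- j < i : untouched in both
          have : decide (i ≤ j) = false := by simp; omega
          have h2 : decide (i' ≤ j) = false := by simp; omega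
          rw [this, h2]
        · have hgt : i < j := by omega
          rcases Nat.lt_or_ge j i' with hlt' | hge'
          · -- i < j < i' : not a chain node at all
            have hQj : pvQ p j = false := by
              simp only [pvQ, decide_eq_false_iff_not]
              rintro ⟨-, -, h3⟩
              have hr : pvLsb (i + (j - i)) = pvLsb (j - i) :=
                pvLsb_add_lt i (j - i) hi0 (by omega) (by omega)
              have : i + (j - i) = j := by omega
              rw [this] at hr
              have := pvLsb_le (j - i)
              omega
            rw [hQj]
            simp
          · -- i' ≤ j : same condition on both sides
            have h1 : decide (i ≤ j) = true := by simp; omega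
            have h2 : decide (i' ≤ j) = true := by simp; omega
            rw [h1, h2]
    · rw [dif_neg (by intro hc; exact hin hc.1)]
      refine ⟨hlen, ?_⟩
      intro j hj1 hjn
      have : decide (i ≤ j) = false := by
        simp only [decide_eq_false_iff_not]
        intro hc
        have : (i : Int) ≤ (n : Int) := by exact_mod_cast le_trans hc hjn
        exact hin this
      rw [this]
      simp

-- weight mass assigned to rank-slot p by the processed prefix `prev`
def pvC (prev : List (Int × Int)) (rkf : Int → Int) (p : Nat) : Int :=
  ((prev.filter (fun q => decide ((rkf q.1).toNat = p))).map Prod.snd).sum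

theorem pv_sum_filter (l : List (Int × Int)) (f : Int → Nat) (s : Finset Nat) :
    ∑ p ∈ s, ((l.filter (fun q => decide (f q.1 = p))).map Prod.snd).sum
      = ((l.filter (fun q => decide (f q.1 ∈ s))).map Prod.snd).sum := by
  induction l with
  | nil => simp
  | cons a l ih =>
      have hstep : ∀ p : Nat,
          (((a :: l).filter (fun q => decide (f q.1 = p))).map Prod.snd).sum
            = (if f a.1 = p then a.2 else 0)
              + ((l.filter (fun q => decide (f q.1 = p))).map Prod.snd).sum := by
        intro p
        by_cases h : f a.1 = p
        · simp [h]
        · simp [h]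
      rw [Finset.sum_congr rfl (fun p _ => hstep p), Finset.sum_add_distrib, ih,
        Finset.sum_ite_eq s (f a.1) (fun _ => a.2)]
      by_cases h : f a.1 ∈ s
      · simp [h]
      · simp [h]

-- sorted(set(vals)) is strictly increasing and has the same members as vals
theorem pv_uniq_nodup (vals : List Int) :
    (PySem.List.sorted (PySem.Set.ofList vals) (fun v => v)).Nodup :=
  (PySem.List.sorted_perm (PySem.Set.ofList vals) (fun v => v) false).nodup_iff.mpr
    (PySem.Set.nodup_ofList vals)

theorem pv_uniq_pairwise (vals : List Int) :
    (PySem.List.sorted (PySem.Set.ofList vals) (fun v => v)).Pairwise (· < ·) := by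
  have h1 := PySem.List.sorted_pairwise (PySem.Set.ofList vals) (fun v => v)
  have h2 := pv_uniq_nodup vals
  exact (h1.and h2).imp (fun h => lt_of_le_of_ne h.1 h.2)

theorem pv_mem_uniq (vals : List Int) (v : Int) :
    v ∈ PySem.List.sorted (PySem.Set.ofList vals) (fun v => v) ↔ v ∈ vals := by
  rw [(PySem.List.sorted_perm (PySem.Set.ofList vals) (fun v => v) false).mem_iff,
    PySem.Set.mem_ofList]

-- the rank dict built from an enumerate-loop over a nodup list: u[t] ↦ t+1
theorem pv_ranks_getD (u : List Int) (hu : u.Nodup) (t : Nat) (ht : t < u.length) :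
    (u.zipIdx.foldl (fun (d : PySem.Dict Int Int) p => d.insert p.1 ((p.2 : Int) + 1))
        PySem.Dict.empty).getD u[t] 0 = (t : Int) + 1 := by
  have hfst : u.zipIdx.map Prod.fst = u := List.zipIdx_map_fst 0 u
  have hitems := PySem.Dict.items_foldl_insert_fresh u.zipIdx Prod.fst
    (fun p => (p.2 : Int) + 1) PySem.Dict.empty
    (fun a _ => PySem.Dict.contains_empty _) (by rw [hfst]; exact hu)
  have hmem : (u[t], t) ∈ u.zipIdx := by
    rw [List.mem_zipIdx_iff_getElem?]
    simp [List.getElem?_eq_getElem ht]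
  have hmem2 : (u[t], (t : Int) + 1) ∈
      (u.zipIdx.foldl (fun (d : PySem.Dict Int Int) p => d.insert p.1 ((p.2 : Int) + 1))
        PySem.Dict.empty).items := by
    rw [hitems]
    exact List.mem_append_right _ (List.mem_map.mpr ⟨(u[t], t), hmem, rfl⟩)
  apply PySem.Dict.getD_of_mem_items _ hmem2
  have hkeys : (u.zipIdx.foldl (fun (d : PySem.Dict Int Int) p => d.insert p.1 ((p.2 : Int) + 1))
      PySem.Dict.empty).keys = u.zipIdx.map Prod.fst := by
    simp only [PySem.Dict.keys]
    rw [hitems]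
    simp [PySem.Dict.empty, List.map_map, Function.comp_def]
  rw [hkeys, hfst]
  exact hu

theorem pvC_append (prev : List (Int × Int)) (rkf : Int → Int) (v c : Int) (p : Nat) :
    pvC (prev ++ [(v, c)]) rkf p
      = pvC prev rkf p + (if (rkf v).toNat = p then c else 0) := by
  simp only [pvC, List.filter_append, List.map_append, List.sum_append, List.filter_cons,
    List.filter_nil]
  by_cases h : (rkf v).toNat = p
  · simp [h]
  · simp [h]

-- the pure pair-shaped versions of the two inner loops (A: BIT state, B: (value,weight) list)
def pvAStep (n : Int) (st : List Int × Int) (x : Int) : List Int × Int :=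
  let tmp := PySem.Int.mod (aBitSum st.1 (x - 1) 0 + 1) 1000000007
  (aBitAdd st.1 n x tmp, PySem.Int.mod (st.2 + tmp) 1000000007)

def pvBStep (st : List (Int × Int) × Int) (v : Int) : List (Int × Int) × Int :=
  let cur := PySem.Int.mod (st.1.foldl (fun c p => if p.1 < v then c + p.2 else c) 1) 1000000007
  (st.1 ++ [(v, cur)], PySem.Int.mod (st.2 + cur) 1000000007)

theorem pv_core (vals : List Int) (rkf : Int → Int) (n : Nat) (hn : n = vals.length)
    (hbounds : ∀ v ∈ vals, 1 ≤ rkf v ∧ rkf v ≤ (n : Int))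
    (hmono : ∀ v ∈ vals, ∀ w ∈ vals, (rkf v < rkf w ↔ v < w)) :
    ∀ (todo : List Int), (∀ v ∈ todo, v ∈ vals) →
    ∀ (prev : List (Int × Int)), (∀ q ∈ prev, q.1 ∈ vals) →
    ∀ (bit : List Int), bit.length = n + 1 →
    (∀ j : Nat, 1 ≤ j → j ≤ n → PySem.List.pyGetD bit (j : Int) 0
        = ∑ p ∈ Finset.Ioc (j - pvLsb j) j, pvC prev rkf p) →
    ∀ acc : Int,
      ((todo.map rkf).foldl (pvAStep (n : Int)) (bit, acc)).2
        = (todo.foldl pvBStep (prev, acc)).2 := by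
  intro todo
  induction todo with
  | nil => intros; rfl
  | cons v todo ih =>
    intro htodo prev hprev bit hblen hinv acc
    have hv : v ∈ vals := htodo v List.mem_cons_self
    have hxb := hbounds v hv
    have hx1 : 1 ≤ (rkf v).toNat := by omega
    have hxn : (rkf v).toNat ≤ n := by omega
    -- the common "sum of weights of smaller processed values"
    have hS : aBitSum bit (rkf v - 1) 0
        = ((prev.filter (fun q => decide (q.1 < v))).map Prod.snd).sum := by
      have ha : (rkf v - 1) = (((rkf v).toNat - 1 : Nat) : Int) := by omega
      rw [ha, pv_bitSum_eq bit (pvC prev rkf) n hinv ((rkf v).toNat - 1) (by omega) 0]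
      have hswap := pv_sum_filter prev (fun w => (rkf w).toNat) (Finset.Ioc 0 ((rkf v).toNat - 1))
      simp only [pvC]
      rw [hswap, List.filter_congr]
      · ring
      · intro q hq
        rw [decide_eq_decide, Finset.mem_Ioc]
        have hqb := hbounds q.1 (hprev q hq)
        have hm := hmono q.1 (hprev q hq) v hv
        omega
    have hcur : (prev.foldl (fun c p => if p.1 < v then c + p.2 else c) 1)
        = 1 + ((prev.filter (fun q => decide (q.1 < v))).map Prod.snd).sum := by
      rw [PySem.List.foldl_ite_eq_foldl_filter (fun (q : Int × Int) => q.1 < v)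
        (fun c q => c + q.2) prev 1]
      exact PySem.List.foldl_add _ Prod.snd 1
    have htmp : PySem.Int.mod (aBitSum bit (rkf v - 1) 0 + 1) 1000000007
        = PySem.Int.mod (prev.foldl (fun c p => if p.1 < v then c + p.2 else c) 1) 1000000007 := by
      rw [hS, hcur, add_comm]
    -- one unfolding of both folds
    simp only [List.map_cons, List.foldl_cons, pvAStep, pvBStep]
    rw [htmp]
    set cur := PySem.Int.mod (prev.foldl (fun c p => if p.1 < v then c + p.2 else c) 1) 1000000007
      with hcur_def
    -- the BIT add, described by pv_bitAdd_eq
    have hQ : pvQ (rkf v).toNat (rkf v).toNat = true := by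
      have := pvLsb_pos (rkf v).toNat (by omega)
      simp only [pvQ, decide_eq_true_eq]
      omega
    have hadd := pv_bitAdd_eq n cur (rkf v).toNat (n + 1 - (rkf v).toNat) (rkf v).toNat rfl hQ
      bit hblen
    have hxt : ((((rkf v).toNat : Nat)) : Int) = rkf v := by omega
    rw [hxt] at hadd
    have hite : ∀ j : Nat, (pvQ (rkf v).toNat j && decide ((rkf v).toNat ≤ j))
        = decide ((rkf v).toNat ∈ Finset.Ioc (j - pvLsb j) j) := by
      intro j
      rw [pvQ, ← Bool.decide_and, decide_eq_decide, Finset.mem_Ioc]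
      omega
    apply ih (fun w hw => htodo w (List.mem_cons_of_mem v hw))
      (prev ++ [(v, cur)])
      (by intro q hq
          rcases List.mem_append.mp hq with h | h
          · exact hprev q h
          · simp at h; subst h; exact hv)
      _ hadd.1
    intro j hj1 hjn
    rw [hadd.2 j hj1 hjn, hinv j hj1 hjn, hite j]
    have hps : ∀ p : Nat, pvC (prev ++ [(v, cur)]) rkf p
        = pvC prev rkf p + (if (rkf v).toNat = p then cur else 0) :=
      fun p => pvC_append prev rkf v cur p
    rw [Finset.sum_congr rfl (fun p _ => hps p), Finset.sum_add_distrib,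
      Finset.sum_ite_eq (Finset.Ioc (j - pvLsb j) j) ((rkf v).toNat) (fun _ => cur)]
    by_cases hmem : (rkf v).toNat ∈ Finset.Ioc (j - pvLsb j) j
    · simp [hmem]
    · simp [hmem]

theorem pv_seq_proj (arr : List Int) (n : Int) (g : Int) (hg0 : 0 ≤ g) :
    ∀ (bit : List Int) (seq0 : List Int), g.toNat < seq0.length → ∀ (acc : Int),
      arr.foldl (fun (st : List Int × List Int) x =>
          let tmp := PySem.Int.mod (aBitSum st.1 (x - 1) 0 + 1) 1000000007
          (aBitAdd st.1 n x tmp,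
           PySem.List.pySetD st.2 g (PySem.Int.mod (PySem.List.pyGetD st.2 g 0 + tmp) 1000000007)))
        (bit, PySem.List.pySetD seq0 g acc)
      = ((arr.foldl (pvAStep n) (bit, acc)).1,
         PySem.List.pySetD seq0 g (arr.foldl (pvAStep n) (bit, acc)).2) := by
  induction arr with
  | nil => intro bit seq0 hg acc; rfl
  | cons x arr ih =>
    intro bit seq0 hg acc
    simp only [List.foldl_cons]
    have hget : PySem.List.pyGetD (PySem.List.pySetD seq0 g acc) g 0 = acc := by
      rw [PySem.List.pySetD_of_nonneg seq0 acc hg0,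
        PySem.List.pyGetD_eq_getElem _ _ hg0 (by rw [List.length_set]; omega)]
      exact List.getElem_set_self (by simpa using hg)
    have hset2 : ∀ a b : Int, PySem.List.pySetD (PySem.List.pySetD seq0 g a) g b
        = PySem.List.pySetD seq0 g b := by
      intro a b
      rw [PySem.List.pySetD_of_nonneg seq0 a hg0, PySem.List.pySetD_of_nonneg _ b hg0,
        PySem.List.pySetD_of_nonneg seq0 b hg0, List.set_set]
    rw [hget, hset2]
    exact ih _ seq0 hg _

theorem pv_rkf_bounds (vals : List Int) (v : Int) (hv : v ∈ vals) :
    1 ≤ ((PySem.List.sorted (PySem.Set.ofList vals) (fun v => v)).zipIdx.foldl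
        (fun (d : PySem.Dict Int Int) p => d.insert p.1 ((p.2 : Int) + 1))
        PySem.Dict.empty).getD v 0
    ∧ ((PySem.List.sorted (PySem.Set.ofList vals) (fun v => v)).zipIdx.foldl
        (fun (d : PySem.Dict Int Int) p => d.insert p.1 ((p.2 : Int) + 1))
        PySem.Dict.empty).getD v 0 ≤ (vals.length : Int)
    ∧ ∀ w ∈ vals,
      (((PySem.List.sorted (PySem.Set.ofList vals) (fun v => v)).zipIdx.foldl
          (fun (d : PySem.Dict Int Int) p => d.insert p.1 ((p.2 : Int) + 1))
          PySem.Dict.empty).getD v 0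
        < ((PySem.List.sorted (PySem.Set.ofList vals) (fun v => v)).zipIdx.foldl
          (fun (d : PySem.Dict Int Int) p => d.insert p.1 ((p.2 : Int) + 1))
          PySem.Dict.empty).getD w 0 ↔ v < w) := by
  have hnd := pv_uniq_nodup vals
  have hpw := pv_uniq_pairwise vals
  have hlen : (PySem.List.sorted (PySem.Set.ofList vals) (fun v => v)).length ≤ vals.length := by
    rw [(PySem.List.sorted_perm (PySem.Set.ofList vals) (fun v => v) false).length_eq]
    exact PySem.Set.length_ofList_le vals
  have hidx : ∀ z ∈ vals, ∃ t : Nat,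
      ∃ ht : t < (PySem.List.sorted (PySem.Set.ofList vals) (fun v => v)).length,
      (PySem.List.sorted (PySem.Set.ofList vals) (fun v => v))[t] = z ∧
      ((PySem.List.sorted (PySem.Set.ofList vals) (fun v => v)).zipIdx.foldl
        (fun (d : PySem.Dict Int Int) p => d.insert p.1 ((p.2 : Int) + 1))
        PySem.Dict.empty).getD z 0 = (t : Int) + 1 := by
    intro z hz
    have hzin : z ∈ PySem.List.sorted (PySem.Set.ofList vals) (fun v => v) :=
      (pv_mem_uniq vals z).mpr hz
    obtain ⟨t, ht, hev⟩ := List.mem_iff_getElem.mp hzin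
    refine ⟨t, ht, hev, ?_⟩
    rw [← hev]
    exact pv_ranks_getD _ hnd t ht
  obtain ⟨t, ht, hev, hr⟩ := hidx v hv
  refine ⟨by rw [hr]; omega, by rw [hr]; omega, ?_⟩
  intro w hw
  obtain ⟨s, hs, hev2, hr2⟩ := hidx w hw
  rw [hr, hr2]
  have hget := List.pairwise_iff_getElem.mp hpw
  constructor
  · intro hlt
    have hts : t < s := by omega
    have := hget t s ht hs hts
    rw [hev, hev2] at this
    exact this
  · intro hvw
    rcases Nat.lt_trichotomy t s with h | h | h
    · omega
    · subst h; rw [hev] at hev2; omega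
    · have := hget s t hs ht h
      rw [hev, hev2] at this
      omega

theorem pv_group (nums : List Int) (gIdx : List (List Int)) (groups : List (List Int))
    (hrel : groups = gIdx.map (List.map (fun idx => PySem.List.pyGetD nums idx 0)))
    (seq : List Int) (g : Int) (hg0 : 0 ≤ g) (hg : g.toNat < seq.length)
    (hz : PySem.List.pyGetD seq g 0 = 0) :
    aGroup nums gIdx seq g = bGroup groups seq g := by
  have hvals : PySem.List.pyGetD groups g []
      = (PySem.List.pyGetD gIdx g []).map (fun idx => PySem.List.pyGetD nums idx 0) := by
    rw [hrel]
    simpa using PySem.List.pyGetD_map (List.map (fun idx => PySem.List.pyGetD nums idx 0)) gIdx g []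
  simp only [aGroup, bGroup]
  rw [hvals]
  set vals := (PySem.List.pyGetD gIdx g []).map (fun idx => PySem.List.pyGetD nums idx 0) with hvdef
  set rkf := (fun v : Int =>
    ((PySem.List.sorted (PySem.Set.ofList vals) (fun v => v)).zipIdx.foldl
      (fun (d : PySem.Dict Int Int) p => d.insert p.1 ((p.2 : Int) + 1))
      PySem.Dict.empty).getD v 0) with hrkf
  set arr := vals.map rkf with harr
  have hseq : PySem.List.pySetD seq g 0 = seq := by
    rw [PySem.List.pySetD_of_nonneg seq 0 hg0]
    have h0 : (0 : Int) = seq[g.toNat] := by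
      rw [← PySem.List.pyGetD_eq_getElem seq 0 hg0 (by omega)]
      exact hz.symm
    rw [h0]
    exact List.set_getElem_self (by simpa using hg)
  conv_lhs => rw [← hseq]
  rw [pv_seq_proj arr (PySem.List.len arr) g hg0 (List.replicate (arr.length + 1) 0) seq hg 0]
  show PySem.List.pySetD seq g _ = PySem.List.pySetD seq g _
  apply congrArg
  have hlen : PySem.List.len arr = ((vals.length : Nat) : Int) := by
    rw [PySem.List.len_eq, harr, List.length_map]
  rw [hlen]
  have hblen : (List.replicate (arr.length + 1) (0 : Int)).length = vals.length + 1 := by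
    rw [List.length_replicate, harr, List.length_map]
  exact pv_core vals rkf vals.length rfl
    (fun v hv => ⟨(pv_rkf_bounds vals v hv).1, (pv_rkf_bounds vals v hv).2.1⟩)
    (fun v hv w hw => (pv_rkf_bounds vals v hv).2.2 w hw)
    vals (fun _ h => h) [] (by intro q hq; cases hq)
    (List.replicate (arr.length + 1) 0) hblen
    (by
      intro j hj1 hjn
      have hjr : j < arr.length + 1 := by
        rw [harr, List.length_map]; omega
      rw [PySem.List.pyGetD_natCast, List.getD_replicate _ hjr]
      simp [pvC])
    0

-- small pySetD/pyGetD utilities (nonnegative indices)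
theorem pv_getD_setD_self (dp : List Int) (g : Int) (hg0 : 0 ≤ g) (hg : g.toNat < dp.length)
    (v : Int) : PySem.List.pyGetD (PySem.List.pySetD dp g v) g 0 = v := by
  rw [PySem.List.pySetD_of_nonneg dp v hg0,
    PySem.List.pyGetD_eq_getElem _ 0 hg0 (by rw [List.length_set]; omega)]
  exact List.getElem_set_self (by simpa using hg)

theorem pv_getD_setD_ne (dp : List Int) (g k : Int) (hg0 : 0 ≤ g) (hk0 : 0 ≤ k) (hne : k ≠ g)
    (v : Int) : PySem.List.pyGetD (PySem.List.pySetD dp g v) k 0 = PySem.List.pyGetD dp k 0 := by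
  rw [PySem.List.pySetD_of_nonneg dp v hg0]
  have hk : k = ((k.toNat : Nat) : Int) := by omega
  rw [hk, PySem.List.pyGetD_natCast, PySem.List.pyGetD_natCast]
  rw [List.getD_eq_getElem?_getD, List.getD_eq_getElem?_getD,
    List.getElem?_set_ne (by omega)]

theorem pv_setD_setD (dp : List Int) (g : Int) (hg0 : 0 ≤ g) (a b : Int) :
    PySem.List.pySetD (PySem.List.pySetD dp g a) g b = PySem.List.pySetD dp g b := by
  rw [PySem.List.pySetD_of_nonneg dp a hg0, PySem.List.pySetD_of_nonneg _ b hg0,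
    PySem.List.pySetD_of_nonneg dp b hg0, List.set_set]

theorem pv_mod_addM (a : Int) :
    PySem.Int.mod (a + 1000000007) 1000000007 = PySem.Int.mod a 1000000007 := by
  rw [PySem.Int.mod_eq_emod_of_pos (by norm_num), PySem.Int.mod_eq_emod_of_pos (by norm_num)]
  exact Int.add_emod_right a 1000000007

-- map relation for one append
theorem pv_append_rel (F : Int → Int) (g : List (List Int)) (j x : Int) (hj : 0 ≤ j) :
    bAppend (g.map (List.map F)) j (F x) = (aAppend g j x).map (List.map F) := by
  unfold aAppend bAppend
  have hget : PySem.List.pyGetD (g.map (List.map F)) j []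
      = List.map F (PySem.List.pyGetD g j []) := by
    simpa using PySem.List.pyGetD_map (List.map F) g j []
  rw [hget, PySem.List.pySetD_of_nonneg _ _ hj, PySem.List.pySetD_of_nonneg g _ hj,
    List.map_set]
  congr 1
  rw [List.map_append]
  rfl

-- the divisor loops of A and B build map-related tables
theorem pv_div_rel (F : Int → Int) (v i : Int) (hFi : F i = v) :
    ∀ K : Nat, ∀ j : Int, (v + 1 - j).toNat = K → 1 ≤ j → ∀ g : List (List Int),
      bDivisors v (g.map (List.map F)) j = (aDivisors v i g j).map (List.map F) := by
  intro K
  induction K using Nat.strong_induction_on with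
  | _ K ih =>
    intro j hK hj g
    subst hFi
    rw [bDivisors, aDivisors]
    by_cases h : j * j ≤ F i
    · rw [dif_pos h, dif_pos h]
      have hv1 : 1 ≤ F i := by nlinarith
      have hjv : j ≤ F i := by nlinarith
      have hdvd0 : 0 ≤ PySem.Int.floordiv (F i) j := by
        rw [PySem.Int.floordiv_eq_ediv_of_pos (by omega)]
        exact Int.ediv_nonneg (by omega) (by omega)
      by_cases hmod : PySem.Int.mod (F i) j = 0
      · rw [if_pos hmod, if_pos hmod]
        by_cases hsq : j * j ≠ F i
        · rw [if_pos hsq, if_pos hsq]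
          rw [pv_append_rel F g j i (by omega),
            pv_append_rel F (aAppend g j i) (PySem.Int.floordiv (F i) j) i hdvd0]
          exact ih ((F i + 1 - (j+1)).toNat) (by omega) (j+1) rfl (by omega) _
        · rw [if_neg hsq, if_neg hsq]
          rw [pv_append_rel F g j i (by omega)]
          exact ih ((F i + 1 - (j+1)).toNat) (by omega) (j+1) rfl (by omega) _
      · rw [if_neg hmod, if_neg hmod]
        exact ih ((F i + 1 - (j+1)).toNat) (by omega) (j+1) rfl (by omega) _
    · rw [dif_neg h, dif_neg h]

theorem pv_phase1 (nums : List Int) (mx : Int) :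
    bPhase1 nums mx
      = (aPhase1 nums mx).map (List.map (fun idx => PySem.List.pyGetD nums idx 0)) := by
  unfold aPhase1 bPhase1
  have key : ∀ (l : List Int) (g0 : List (List Int)),
      l.foldl (fun g i => bDivisors (PySem.List.pyGetD nums i 0) g 1)
          (g0.map (List.map (fun idx => PySem.List.pyGetD nums idx 0)))
        = (l.foldl (fun g i => aDivisors (PySem.List.pyGetD nums i 0) i g 1) g0).map
            (List.map (fun idx => PySem.List.pyGetD nums idx 0)) := by
    intro l
    induction l with
    | nil => intro g0; rfl
    | cons i l ihl =>
        intro g0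
        simp only [List.foldl_cons]
        rw [pv_div_rel (fun idx => PySem.List.pyGetD nums idx 0) (PySem.List.pyGetD nums i 0) i rfl
          ((PySem.List.pyGetD nums i 0 + 1 - 1).toNat) 1 rfl (by omega) g0]
        exact ihl _
  have hnums : nums = (PySem.List.pyRange 0 (PySem.List.len nums) 1).map
      (fun i => PySem.List.pyGetD nums i 0) :=
    (PySem.List.map_pyGetD_pyRange_zero nums 0).symm
  have hrep : (List.replicate (mx + 1).toNat ([] : List Int)).map
      (List.map (fun idx => PySem.List.pyGetD nums idx 0))
      = List.replicate (mx + 1).toNat ([] : List Int) := by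
    rw [List.map_replicate]
    rfl
  conv_lhs => rw [hnums, List.foldl_map, ← hrep]
  exact key (PySem.List.pyRange 0 (PySem.List.len nums) 1) _


theorem pv_phase2 (nums : List Int) (gIdx : List (List Int)) (mx : Int) :
    aPhase2 nums gIdx mx
      = bPhase2 (gIdx.map (List.map (fun idx => PySem.List.pyGetD nums idx 0))) mx := by
  unfold aPhase2 bPhase2
  have main : ∀ gs : List Int, (∀ g ∈ gs, 1 ≤ g ∧ g < mx + 1) → gs.Pairwise (· < ·) →
      ∀ seq : List Int, seq.length = (mx + 1).toNat →
        (∀ g ∈ gs, PySem.List.pyGetD seq g 0 = 0) →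
        gs.foldl (aGroup nums gIdx) seq
          = gs.foldl (bGroup (gIdx.map (List.map (fun idx => PySem.List.pyGetD nums idx 0)))) seq := by
    intro gs
    induction gs with
    | nil => intros; rfl
    | cons g gs ih =>
      intro hb hp seq hlen hz
      simp only [List.foldl_cons]
      have hg1 := (hb g List.mem_cons_self).1
      have hg2 := (hb g List.mem_cons_self).2
      have hg0 : (0:Int) ≤ g := by omega
      have hgt : g.toNat < seq.length := by rw [hlen]; omega
      rw [pv_group nums gIdx _ rfl seq g hg0 hgt (hz g List.mem_cons_self)]
      apply ih (fun g' h => hb g' (List.mem_cons_of_mem g h)) hp.of_cons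
      · simp only [bGroup, PySem.List.length_pySetD]
        exact hlen
      · intro g' hg'
        have hgg' : g < g' := List.rel_of_pairwise_cons hp hg'
        have h1 := (hb g' (List.mem_cons_of_mem g hg')).1
        simp only [bGroup]
        rw [pv_getD_setD_ne seq g g' hg0 (by omega) (by omega)]
        exact hz g' (List.mem_cons_of_mem g hg')
  apply main
  · intro g hg
    exact (PySem.List.mem_pyRange_one.mp hg)
  · exact PySem.List.pairwise_lt_pyRange_one 1 (mx + 1)
  · exact List.length_replicate
  · intro g hg
    have h1 := PySem.List.mem_pyRange_one.mp hg
    rw [PySem.List.pyGetD_eq_getElem _ 0 (by omega) (by rw [List.length_replicate]; omega)]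
    exact List.getElem_replicate _

theorem pv_aMoebius_aux (mx g : Int) : ∀ K : Nat, ∀ j : Int, ∀ dp : List Int,
    (mx + 1 - j).toNat = K →
    (aMoebius dp mx g j).length = dp.length ∧
    ∀ k : Int, 0 ≤ k → k ≠ g →
      PySem.List.pyGetD (aMoebius dp mx g j) k 0 = PySem.List.pyGetD dp k 0 := by
  intro K
  induction K using Nat.strong_induction_on with
  | _ K ih =>
    intro j dp hK
    rw [aMoebius]
    by_cases hc : j ≤ mx ∧ 0 < g
    · rw [dif_pos hc]
      have hrec := ih ((mx + 1 - (j + g)).toNat) (by omega) (j + g)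
        (PySem.List.pySetD dp g
          (PySem.Int.mod (PySem.List.pyGetD dp g 0 - PySem.List.pyGetD dp j 0 + 1000000007)
            1000000007)) rfl
      refine ⟨by rw [hrec.1, PySem.List.length_pySetD], ?_⟩
      intro k hk0 hkg
      rw [hrec.2 k hk0 hkg, pv_getD_setD_ne dp g k (by omega) hk0 hkg]
    · rw [dif_neg hc]
      exact ⟨rfl, fun _ _ _ => rfl⟩

theorem pv_moebius_rel (mx : Int) : ∀ K : Nat, ∀ j g : Int, ∀ dp : List Int, ∀ s : Int,
    (mx + 1 - j).toNat = K → 0 < g → g < j → g.toNat < dp.length →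
    aMoebius (PySem.List.pySetD dp g s) mx g j = PySem.List.pySetD dp g (bMoebius s dp mx g j) := by
  intro K
  induction K using Nat.strong_induction_on with
  | _ K ih =>
    intro j g dp s hK hg0 hgj hglen
    rw [aMoebius, bMoebius]
    by_cases hc : j ≤ mx ∧ 0 < g
    · rw [dif_pos hc, dif_pos hc]
      rw [pv_getD_setD_self dp g (by omega) hglen s,
        pv_getD_setD_ne dp g j (by omega) (by omega) (by omega),
        pv_setD_setD dp g (by omega)]
      rw [show s - PySem.List.pyGetD dp j 0 + 1000000007
          = (s - PySem.List.pyGetD dp j 0) + 1000000007 from rfl, pv_mod_addM]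
      exact ih ((mx + 1 - (j + g)).toNat) (by omega) (j + g) g dp _ rfl hg0 (by omega) hglen
    · rw [dif_neg hc, dif_neg hc]

theorem pv_foldA_preserve (seq : List Int) (mx : Int) :
    ∀ gs : List Int, (∀ g' ∈ gs, 0 < g') → ∀ dp : List Int,
    ((gs.foldl (fun dp g =>
        aMoebius (PySem.List.pySetD dp g (PySem.List.pyGetD seq g 0)) mx g (g * 2)) dp).length
      = dp.length) ∧
    ∀ k : Int, 0 ≤ k → (∀ g' ∈ gs, k ≠ g') →
      PySem.List.pyGetD (gs.foldl (fun dp g =>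
          aMoebius (PySem.List.pySetD dp g (PySem.List.pyGetD seq g 0)) mx g (g * 2)) dp) k 0
        = PySem.List.pyGetD dp k 0 := by
  intro gs
  induction gs with
  | nil => exact fun _ dp => ⟨rfl, fun _ _ _ => rfl⟩
  | cons g' gs ih =>
    intro hpos dp
    simp only [List.foldl_cons]
    have hg' : 0 < g' := hpos g' List.mem_cons_self
    obtain ⟨ihlen, ihget⟩ := ih (fun x hx => hpos x (List.mem_cons_of_mem g' hx)) _
    have haux := pv_aMoebius_aux mx g' ((mx + 1 - g' * 2).toNat) (g' * 2)
      (PySem.List.pySetD dp g' (PySem.List.pyGetD seq g' 0)) rfl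
    constructor
    · rw [ihlen, haux.1, PySem.List.length_pySetD]
    · intro k hk0 hkne
      rw [ihget k hk0 (fun x hx => hkne x (List.mem_cons_of_mem g' hx)),
        haux.2 k hk0 (hkne g' List.mem_cons_self),
        pv_getD_setD_ne dp g' k (by omega) hk0 (hkne g' List.mem_cons_self)]

theorem pv_modfold (h : Int → Int) : ∀ l : List Int, l ≠ [] → ∀ r : Int,
    l.foldl (fun r g => PySem.Int.mod (r + h g) 1000000007) r
      = PySem.Int.mod (r + (l.map h).sum) 1000000007 := by
  intro l
  induction l with
  | nil => intro hne; exact absurd rfl hne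
  | cons g l ih =>
    intro _ r
    simp only [List.foldl_cons, List.map_cons, List.sum_cons]
    rcases eq_or_ne l [] with rfl | hl
    · simp
    · rw [ih hl, PySem.Int.mod_eq_emod_of_pos (by norm_num),
        PySem.Int.mod_eq_emod_of_pos (by norm_num), Int.emod_add_emod, add_assoc,
        ← PySem.Int.mod_eq_emod_of_pos (show (0:Int) < 1000000007 by norm_num)]

theorem pv_range_rev (mx : Int) :
    PySem.List.pyRange mx 0 (-1) = (PySem.List.pyRange 1 (mx + 1) 1).reverse := by
  rw [PySem.List.pyRange_neg_one, PySem.List.pyRange_one]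
  apply List.ext_getElem
  · simp
  · intro k h1 h2
    rw [List.getElem_map, List.getElem_range, List.getElem_reverse, List.getElem_map,
      List.getElem_range]
    simp only [List.length_map, List.length_range] at h1 h2 ⊢
    have hk : k < (mx - 0).toNat := by simpa using h1
    omega

theorem pv_phase34 (seq : List Int) (mx : Int) :
    aPhase4 (aPhase3 seq mx) mx = (bPhase3 seq mx).2 := by
  unfold aPhase3 aPhase4 bPhase3
  have key : ∀ gs : List Int, (∀ g ∈ gs, 0 < g ∧ g ≤ mx) → gs.Pairwise (· > ·) →
      ∀ dp : List Int, ∀ ret : Int, (mx + 1).toNat = dp.length →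
      (gs.foldl (fun (st : List Int × Int) g =>
          let val := bMoebius (PySem.List.pyGetD seq g 0) st.1 mx g (2 * g)
          (PySem.List.pySetD st.1 g val, PySem.Int.mod (st.2 + g * val) 1000000007))
        (dp, ret)).1
        = gs.foldl (fun dp g =>
            aMoebius (PySem.List.pySetD dp g (PySem.List.pyGetD seq g 0)) mx g (g * 2)) dp ∧
      (gs.foldl (fun (st : List Int × Int) g =>
          let val := bMoebius (PySem.List.pyGetD seq g 0) st.1 mx g (2 * g)
          (PySem.List.pySetD st.1 g val, PySem.Int.mod (st.2 + g * val) 1000000007))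
        (dp, ret)).2
        = gs.foldl (fun r g => PySem.Int.mod (r + g * PySem.List.pyGetD
            (gs.foldl (fun dp g =>
              aMoebius (PySem.List.pySetD dp g (PySem.List.pyGetD seq g 0)) mx g (g * 2)) dp)
            g 0) 1000000007) ret := by
    intro gs
    induction gs with
    | nil => exact fun _ _ dp ret _ => ⟨rfl, rfl⟩
    | cons g gs ih =>
      intro hb hp dp ret hlen
      have hg0 : 0 < g := (hb g List.mem_cons_self).1
      have hgmx : g ≤ mx := (hb g List.mem_cons_self).2
      have hglen : g.toNat < dp.length := by omega
      have hA : aMoebius (PySem.List.pySetD dp g (PySem.List.pyGetD seq g 0)) mx g (g * 2)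
          = PySem.List.pySetD dp g
              (bMoebius (PySem.List.pyGetD seq g 0) dp mx g (2 * g)) := by
        rw [show g * 2 = 2 * g from mul_comm g 2]
        exact pv_moebius_rel mx ((mx + 1 - 2 * g).toNat) (2 * g) g dp _ rfl hg0 (by omega) hglen
      simp only [List.foldl_cons]
      rw [hA]
      set val := bMoebius (PySem.List.pyGetD seq g 0) dp mx g (2 * g) with hval
      have hb' : ∀ x ∈ gs, 0 < x ∧ x ≤ mx := fun x hx => hb x (List.mem_cons_of_mem g hx)
      have hgt : ∀ x ∈ gs, g > x := fun x hx => List.rel_of_pairwise_cons hp hx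
      obtain ⟨ih1, ih2⟩ := ih hb' hp.of_cons (PySem.List.pySetD dp g val)
        (PySem.Int.mod (ret + g * val) 1000000007)
        (by rw [PySem.List.length_pySetD]; exact hlen)
      refine ⟨ih1, ?_⟩
      rw [ih2]
      have hpres := pv_foldA_preserve seq mx gs (fun x hx => (hb' x hx).1)
        (PySem.List.pySetD dp g val)
      have hfin : PySem.List.pyGetD
          (gs.foldl (fun dp g =>
            aMoebius (PySem.List.pySetD dp g (PySem.List.pyGetD seq g 0)) mx g (g * 2))
            (PySem.List.pySetD dp g val)) g 0 = val := by
        rw [hpres.2 g (by omega) (fun x hx => by have := hgt x hx; omega)]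
        exact pv_getD_setD_self dp g (by omega) hglen val
      rw [hfin]
  rcases le_or_gt mx 0 with hmx | hmx
  · rw [PySem.List.pyRange_neg_one_eq_nil (by omega), PySem.List.pyRange_one_eq_nil (by omega)]
    rfl
  · have hb : ∀ g ∈ PySem.List.pyRange mx 0 (-1), 0 < g ∧ g ≤ mx := by
      intro g hg
      rw [PySem.List.pyRange_neg_one] at hg
      obtain ⟨k, hk, rfl⟩ := List.mem_map.mp hg
      rw [List.mem_range] at hk
      constructor <;> omega
    have hp : (PySem.List.pyRange mx 0 (-1)).Pairwise (· > ·) := by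
      rw [PySem.List.pyRange_neg_one]
      rw [List.pairwise_map]
      apply List.Pairwise.imp _ (List.pairwise_lt_range)
      intro a b hab
      omega
    obtain ⟨k1, k2⟩ := key (PySem.List.pyRange mx 0 (-1)) hb hp
      (List.replicate (mx + 1).toNat 0) 0 (by rw [List.length_replicate])
    rw [k2]
    have hne1 : PySem.List.pyRange 1 (mx + 1) 1 ≠ [] :=
      List.ne_nil_of_mem (PySem.List.mem_pyRange_one.mpr ⟨le_refl 1, by omega⟩)
    have hne2 : PySem.List.pyRange mx 0 (-1) ≠ [] := by
      rw [pv_range_rev]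
      simpa using hne1
    rw [pv_modfold _ _ hne1 0, pv_modfold _ _ hne2 0, pv_range_rev, List.map_reverse,
      List.sum_reverse]

theorem pv_equal (nums : List Int) : totalBeauty nums = totalBeauty_alt nums := by
  cases hmax : PySem.List.max? nums (fun v => v) with
  | none => simp [totalBeauty, totalBeauty_alt, hmax]
  | some mx =>
    simp only [totalBeauty, totalBeauty_alt, hmax]
    rw [pv_phase1 nums mx, ← pv_phase2 nums (aPhase1 nums mx) mx]
    exact pv_phase34 (aPhase2 nums (aPhase1 nums mx) mx) mx

-- ===== VERDICT (by name: the statement is the Claim_ definition above) =====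
theorem totalBeauty_spec : Claim_equal_totalBeauty := by
  intro nums _ _
  exact pv_equal nums
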